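-- pv_equiv track=rewrite | github.com/lyston11/SGSAT-KT | utils/kt_dataset.py | is_binary_like_line
-- ===== SOURCE A (Python) =====
-- def is_binary_like_line(line, expected_len=None):
--     stripped = line.strip()
--     if not stripped or "," not in stripped:
--         return False
--     parts = stripped.split(",")
--     if expected_len is not None and len(parts) != expected_len:
--         return False
--     try:
--         return all(part in {"0", "1", "-1"} for part in parts)
--     except Exception:
--         return False
-- ===== SOURCE B (Python) =====
-- def is_binary_like_line(line, expected_len=None):
--     stripped = line.strip()
--     if not stripped or "," not in stripped:
--         return False
--     if expected_len is not None and stripped.count(",") + 1 != expected_len: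
--         return False
--     # single left-to-right character scan: no parts list is built
--     ok = True
--     tok = ""
--     for ch in stripped:
--         if ch == ",":
--             if tok not in ("0", "1", "-1"):
--                 ok = False
--             tok = ""
--         else:
--             tok += ch
--     return ok and tok in ("0", "1", "-1")
-- ===== Notes on version B (the rewrite author's own statement) =====
-- stated objective: alternative
-- what changed: B validates the stripped line in a single character scan with a running token accumulator (using the comma count plus one for the length check) instead of building the split parts list and testing each part against a set.
import Mathlib
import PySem

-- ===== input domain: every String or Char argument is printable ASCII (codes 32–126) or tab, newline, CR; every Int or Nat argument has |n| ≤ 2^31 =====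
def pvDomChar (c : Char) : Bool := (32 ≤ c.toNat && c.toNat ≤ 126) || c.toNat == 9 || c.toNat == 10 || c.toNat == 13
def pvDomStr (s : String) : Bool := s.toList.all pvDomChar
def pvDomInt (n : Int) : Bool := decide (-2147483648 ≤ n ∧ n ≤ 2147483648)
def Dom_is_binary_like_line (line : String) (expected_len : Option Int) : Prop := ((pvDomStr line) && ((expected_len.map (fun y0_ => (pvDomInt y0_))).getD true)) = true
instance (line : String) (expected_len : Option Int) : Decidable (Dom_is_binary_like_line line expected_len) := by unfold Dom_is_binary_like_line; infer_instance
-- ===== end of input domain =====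

-- B replaces A's split-into-parts-then-test-each with a single character scan
-- carrying a running token (length checked via the comma count plus one): an alternative
-- one-pass algorithm of the same cost.


-- ===== PORT A =====
def is_binary_like_line (line : String) (expected_len : Option Int) : Bool :=
  let stripped := PySem.Chars.strip line.toList
  if stripped.isEmpty || !(PySem.Chars.isIn [','] stripped) then false
  else
    let parts := PySem.Chars.splitOn stripped [',']
    if (match expected_len with
        | some n => decide ((parts.length : Int) ≠ n)
        | none => false) then false
    else
      parts.all (fun p => PySem.Set.contains (PySem.Set.ofList [['0'], ['1'], ['-', '1']]) p)

-- ===== PORT B =====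
def pvTokOk (t : List Char) : Bool := t == ['0'] || t == ['1'] || t == ['-', '1']

def is_binary_like_line_alt (line : String) (expected_len : Option Int) : Bool :=
  let stripped := PySem.Chars.strip line.toList
  if stripped.isEmpty || !(PySem.Chars.isIn [','] stripped) then false
  else if (match expected_len with
      | some n => decide (((PySem.Chars.count stripped [','] : Int) + 1) ≠ n)
      | none => false) then false
  else
    let st := stripped.foldl
      (fun (p : Bool × List Char) ch =>
        if ch == ',' then (p.1 && pvTokOk p.2, []) else (p.1, p.2 ++ [ch]))
      (true, [])
    st.1 && pvTokOk st.2

-- ===== PRECONDITION & SPEC =====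
def Spec_is_binary_like_line (line : String) (expected_len : Option Int) (out : Bool) : Prop := out = is_binary_like_line_alt line expected_len
instance (line : String) (expected_len : Option Int) (out : Bool) : Decidable (Spec_is_binary_like_line line expected_len out) := by unfold Spec_is_binary_like_line; infer_instance

-- ===== CLAIM (what is proved, stated in full; the proofs are below) =====
def Claim_equal_is_binary_like_line : Prop := ∀ (line : String) (expected_len : Option Int), Dom_is_binary_like_line line expected_len → Spec_is_binary_like_line line expected_len (is_binary_like_line line expected_len)

-- ===== LEMMAS AND PROOFS =====

/-- Simple structural recursion computing `splitOn` with separator `[',']`. -/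
def pvSplit1 (l : List Char) : List (List Char) :=
  match l with
  | [] => [[]]
  | c :: rest =>
    if c = ',' then [] :: pvSplit1 rest
    else
      match pvSplit1 rest with
      | t :: ts => (c :: t) :: ts
      | [] => [[c]]

/-- Prepend `t` to the first piece. -/
def pvConsHead (t : List Char) : List (List Char) → List (List Char)
  | [] => [t]
  | h :: hs => (t ++ h) :: hs

theorem pvSplit1_ne_nil (l : List Char) : pvSplit1 l ≠ [] := by
  cases l with
  | nil => simp [pvSplit1]
  | cons c rest =>
    simp only [pvSplit1]
    split
    · simp
    · split <;> simp

theorem pvSplitOn_go_eq (fuel : Nat) (l cur : List Char) (acc : List (List Char))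
    (h : l.length ≤ fuel) :
    PySem.Chars.splitOn.go [','] fuel l cur acc
      = acc.reverse ++ pvConsHead cur.reverse (pvSplit1 l) := by
  induction fuel generalizing l cur acc with
  | zero =>
    have : l = [] := List.eq_nil_of_length_eq_zero (Nat.le_zero.mp h)
    subst this
    simp [PySem.Chars.splitOn.go, pvSplit1, pvConsHead]
  | succ fuel ih =>
    cases l with
    | nil => simp [PySem.Chars.splitOn.go, pvSplit1, pvConsHead]
    | cons c rest =>
      have hr : rest.length ≤ fuel := by simpa using Nat.lt_succ_iff.mp (by simpa using h)
      by_cases hc : c = ','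
      · subst hc
        rw [show PySem.Chars.splitOn.go [','] (fuel + 1) (',' :: rest) cur acc
              = PySem.Chars.splitOn.go [','] fuel rest [] (cur.reverse :: acc) by
            simp [PySem.Chars.splitOn.go, List.isPrefixOf]]
        rw [ih rest [] (cur.reverse :: acc) hr]
        cases hps : pvSplit1 rest with
        | nil => exact absurd hps (pvSplit1_ne_nil rest)
        | cons t ts => simp [pvSplit1, pvConsHead, hps]
      · rw [show PySem.Chars.splitOn.go [','] (fuel + 1) (c :: rest) cur acc
              = PySem.Chars.splitOn.go [','] fuel rest (c :: cur) acc by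
            simp [PySem.Chars.splitOn.go, List.isPrefixOf]
            exact fun h => absurd h.symm hc]
        rw [ih rest (c :: cur) acc hr]
        cases hps : pvSplit1 rest with
        | nil => exact absurd hps (pvSplit1_ne_nil rest)
        | cons t ts => simp [pvSplit1, pvConsHead, hps, hc]

theorem pvSplitOn_eq (l : List Char) :
    PySem.Chars.splitOn l [','] = pvSplit1 l := by
  have := pvSplitOn_go_eq (l.length + 1) l [] [] (Nat.le_succ _)
  rw [PySem.Chars.splitOn, this]
  cases hps : pvSplit1 l with
  | nil => exact absurd hps (pvSplit1_ne_nil l)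
  | cons t ts => simp [pvConsHead]

/-- Count of ',' characters, structurally. -/
def pvCount1 (l : List Char) : Nat :=
  match l with
  | [] => 0
  | c :: rest => (if c = ',' then 1 else 0) + pvCount1 rest

theorem pvCount_go_eq (fuel : Nat) (l : List Char) (acc : Nat)
    (h : l.length ≤ fuel) :
    PySem.Chars.count.go [','] fuel l acc = acc + pvCount1 l := by
  induction fuel generalizing l acc with
  | zero =>
    have : l = [] := List.eq_nil_of_length_eq_zero (Nat.le_zero.mp h)
    subst this
    simp [PySem.Chars.count.go, pvCount1]
  | succ fuel ih =>
    cases l with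
    | nil => simp [PySem.Chars.count.go, pvCount1]
    | cons c rest =>
      have hr : rest.length ≤ fuel := by simpa using Nat.lt_succ_iff.mp (by simpa using h)
      by_cases hc : c = ','
      · subst hc
        rw [show PySem.Chars.count.go [','] (fuel + 1) (',' :: rest) acc
              = PySem.Chars.count.go [','] fuel rest (acc + 1) by
            simp [PySem.Chars.count.go, List.isPrefixOf]]
        rw [ih rest (acc + 1) hr]
        simp [pvCount1]; omega
      · rw [show PySem.Chars.count.go [','] (fuel + 1) (c :: rest) acc
              = PySem.Chars.count.go [','] fuel rest acc by
            simp [PySem.Chars.count.go, List.isPrefixOf]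
            exact fun h => absurd h.symm hc]
        rw [ih rest acc hr]
        simp [pvCount1, hc]

theorem pvCount_eq (l : List Char) :
    PySem.Chars.count l [','] = pvCount1 l := by
  rw [PySem.Chars.count]
  simp only [List.isEmpty_cons, Bool.false_eq_true, if_false]
  simpa using pvCount_go_eq l.length l 0 le_rfl

theorem pvSplit1_length (l : List Char) :
    (pvSplit1 l).length = pvCount1 l + 1 := by
  induction l with
  | nil => simp [pvSplit1, pvCount1]
  | cons c rest ih =>
    by_cases hc : c = ','
    · simp [pvSplit1, pvCount1, hc, ih]; omega
    · cases hps : pvSplit1 rest with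
      | nil => exact absurd hps (pvSplit1_ne_nil rest)
      | cons t ts =>
        have h2 := ih; rw [hps] at h2
        simp only [List.length_cons] at h2
        simp [pvSplit1, pvCount1, hc, hps]; omega

theorem pvSet_contains_eq (p : List Char) :
    PySem.Set.contains (PySem.Set.ofList [['0'], ['1'], ['-', '1']]) p = pvTokOk p := by
  rw [show PySem.Set.ofList [['0'], ['1'], ['-', '1']] = [['0'], ['1'], ['-', '1']] from by decide]
  rw [PySem.Set.contains_eq_listContains]
  simp [pvTokOk, Bool.or_assoc, Bool.beq_eq_decide_eq]

theorem pvScan_eq (l : List Char) (b : Bool) (t : List Char) :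
    ((l.foldl
      (fun (p : Bool × List Char) ch =>
        if ch == ',' then (p.1 && pvTokOk p.2, []) else (p.1, p.2 ++ [ch]))
      (b, t)).1
      && pvTokOk (l.foldl
      (fun (p : Bool × List Char) ch =>
        if ch == ',' then (p.1 && pvTokOk p.2, []) else (p.1, p.2 ++ [ch]))
      (b, t)).2)
    = (b && (pvConsHead t (pvSplit1 l)).all pvTokOk) := by
  induction l generalizing b t with
  | nil => simp [pvSplit1, pvConsHead]
  | cons c rest ih =>
    by_cases hc : c = ','
    · subst hc
      simp only [List.foldl_cons, beq_self_eq_true]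
      rw [ih]
      cases hps : pvSplit1 rest with
      | nil => exact absurd hps (pvSplit1_ne_nil rest)
      | cons u us =>
        simp [pvSplit1, pvConsHead, hps, Bool.and_assoc]
    · simp only [List.foldl_cons]
      rw [ih]
      cases hps : pvSplit1 rest with
      | nil => exact absurd hps (pvSplit1_ne_nil rest)
      | cons u us =>
        simp [pvSplit1, pvConsHead, hps, hc]

theorem pvAll_eq (l : List Char) :
    (PySem.Chars.splitOn l [',']).all
        (fun p => PySem.Set.contains (PySem.Set.ofList [['0'], ['1'], ['-', '1']]) p)
    = ((l.foldl
      (fun (p : Bool × List Char) ch =>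
        if ch == ',' then (p.1 && pvTokOk p.2, []) else (p.1, p.2 ++ [ch]))
      (true, [])).1
      && pvTokOk (l.foldl
      (fun (p : Bool × List Char) ch =>
        if ch == ',' then (p.1 && pvTokOk p.2, []) else (p.1, p.2 ++ [ch]))
      (true, [])).2) := by
  rw [pvScan_eq, pvSplitOn_eq]
  cases hps : pvSplit1 l with
  | nil => exact absurd hps (pvSplit1_ne_nil l)
  | cons u us =>
    simp only [pvConsHead, List.nil_append, Bool.true_and]
    congr 1
    funext p
    exact pvSet_contains_eq p

-- ===== VERDICT (by name: the statement is the Claim_ definition above) =====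
theorem is_binary_like_line_spec : Claim_equal_is_binary_like_line := by
  intro line expected_len _
  unfold Spec_is_binary_like_line is_binary_like_line is_binary_like_line_alt
  simp only []
  set stripped := PySem.Chars.strip line.toList with hs
  by_cases h1 : (stripped.isEmpty || !(PySem.Chars.isIn [','] stripped)) = true
  · simp [h1]
  · simp only [Bool.not_eq_true] at h1
    simp only [h1, Bool.false_eq_true, if_false]
    have hlen : ((PySem.Chars.splitOn stripped [',']).length : Int)
        = (PySem.Chars.count stripped [','] : Int) + 1 := by
      rw [pvSplitOn_eq, pvCount_eq, pvSplit1_length]; push_cast; ring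
    cases expected_len with
    | none => simpa using pvAll_eq stripped
    | some n =>
      rw [hlen]
      by_cases h2 : ((PySem.Chars.count stripped [','] : Int) + 1 ≠ n)
      · simp [h2]
      · simp only [h2, decide_false, Bool.false_eq_true, if_false]
        simpa using pvAll_eq stripped
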